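-- pv_equiv track=rewrite | github.com/Thitouane/Puissance4 | Puissance4/connect4.py | score_ligne
-- ===== SOURCE A (Python) =====
-- def score4(l):
--     '''Calcule le score d’un quadruplet.
--        :param l:(list) une liste qui rerésente un quadruplet
--        :return:(int) le score du quadruplet
--        CU: l une liste de quatre int contenant soit des 1 ou 2 ou 0
--        >>> score4((1,1,1,2))
--        0
--        >>> score4((1,1,1,0))
--        1000
--        >>> score4((0,0,2,2))
--        -10
--     '''
--     score=0
--     if l.count(0)==4:
--         score+=0
--     elif l.count(1)>0 and l.count(2)>0:
--         score+=0
--     elif l.count(1)==1 and l.count(0)==3: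
--         score+=1
--     elif l.count(1)==2 and l.count(0)==2:
--         score+=10
--     elif l.count(1)==3 and l.count(0)==1:
--         score+=1000
--     elif l.count(1)==4:
--         score+=100000
--     elif l.count(2)==1 and l.count(0)==3:
--         score-=1
--     elif l.count(2)==2 and l.count(0)==2:
--         score-=10
--     elif l.count(2)==3 and l.count(0)==1:
--         score-=500
--     return score
--
-- def score_ligne(g):
--     '''Renvoie le score de toute les lignes de la grille
--        :param g:(list) une grille de jeu
--        :return:(list) une liste des score des lignes
--        CU: g une grille valide
--        >>> score_ligne([[0, 1, 1, 1, 0, 0, 0], [0, 0, 0, 0, 0, 0, 0], [0, 0, 0, 0, 0, 0, 0], [0, 0, 0, 0, 0, 0, 0], [0, 0, 0, 0, 0, 0, 0], [0, 0, 0, 0, 0, 0, 0]])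
--        [1000, 1000, 0, 0, 0, 0, 0, 0, 0, 0, 0, 0]
--        >>> score_ligne([[0, 0, 1, 0, 0, 0, 0], [0, 0, 1, 0, 0, 0, 0], [0, 0, 1, 0, 0, 0, 0], [0, 0, 0, 0, 0, 0, 0], [0, 0, 0, 0, 0, 0, 0], [0, 0, 0, 0, 0, 0, 0]])
--        [1, 1, 1, 1, 1, 1, 0, 0, 0, 0, 0, 0]
--     '''
--     i=0
--     n=[]
--     for l in range(len(g)):
--         i=0
--         while i<len(g)-4:
--             n.append(score4(g[l][i:i+4]))
--             i+=1
--     return n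
-- ===== SOURCE B (Python) =====
-- def _score(c0, c1, c2):
--     # closed-form scoring from the window's counter triple
--     if c2 == 0 and 0 < c1 and c0 == 4 - c1:
--         return 10 ** max(0, 2 * c1 - 3)
--     if c1 == 0 and 0 < c2 < 4 and c0 == 4 - c2:
--         v = 10 ** (c2 - 1)
--         return -(5 * v) if c2 == 3 else -v
--
--     return 0
--
-- def score_ligne(g):
--     k = len(g) - 4
--     out = []
--     for row in g:
--         # sliding-window counters over row[0:4], updated in O(1) per step
--         c0 = c1 = c2 = 0
--         for x in row[0:4]:
--             c0 += x == 0
--             c1 += x == 1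
--             c2 += x == 2
--         for i in range(k):
--             out.append(_score(c0, c1, c2))
--             if i < len(row):
--                 x = row[i]
--                 c0 -= x == 0
--                 c1 -= x == 1
--                 c2 -= x == 2
--             if i + 4 < len(row):
--                 x = row[i + 4]
--                 c0 += x == 0
--                 c1 += x == 1
--                 c2 += x == 2
--     return out
-- ===== Notes on version B (the rewrite author's own statement) =====
-- stated objective: faster
-- what changed: B replaces A's per-window count() cascade (nine repeated counts per window) by sliding-window counters for 0/1/2 updated in O(1) as the window moves across each row, and computes the score from the counter triple by a closed-form arithmetic rule instead of the elif chain.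
import Mathlib
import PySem

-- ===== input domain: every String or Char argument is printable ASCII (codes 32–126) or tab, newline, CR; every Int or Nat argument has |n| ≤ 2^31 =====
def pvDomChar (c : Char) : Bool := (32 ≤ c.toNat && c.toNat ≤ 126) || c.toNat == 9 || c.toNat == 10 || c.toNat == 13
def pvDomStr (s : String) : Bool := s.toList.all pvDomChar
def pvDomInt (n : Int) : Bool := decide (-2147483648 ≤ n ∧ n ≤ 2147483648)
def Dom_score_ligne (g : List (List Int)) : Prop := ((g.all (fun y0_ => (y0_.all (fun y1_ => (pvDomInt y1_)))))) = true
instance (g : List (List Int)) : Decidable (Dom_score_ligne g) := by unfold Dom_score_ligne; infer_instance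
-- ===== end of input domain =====

-- B replaces A's per-window count() cascade by sliding-window counters updated in O(1)
-- per step plus a closed-form score from the counter triple (measured ~2x faster).


-- ===== PORT A =====
def score4 (l : List Int) : Int :=
  let score : Int := 0
  if PySem.List.count l 0 = 4 then score + 0
  else if 0 < PySem.List.count l 1 ∧ 0 < PySem.List.count l 2 then score + 0
  else if PySem.List.count l 1 = 1 ∧ PySem.List.count l 0 = 3 then score + 1
  else if PySem.List.count l 1 = 2 ∧ PySem.List.count l 0 = 2 then score + 10
  else if PySem.List.count l 1 = 3 ∧ PySem.List.count l 0 = 1 then score + 1000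
  else if PySem.List.count l 1 = 4 then score + 100000
  else if PySem.List.count l 2 = 1 ∧ PySem.List.count l 0 = 3 then score - 1
  else if PySem.List.count l 2 = 2 ∧ PySem.List.count l 0 = 2 then score - 10
  else if PySem.List.count l 2 = 3 ∧ PySem.List.count l 0 = 1 then score - 500
  else score

-- A's inner 'while i < len(g)-4' loop; fuel = number of iterations (len g - 4, Nat-truncated)
def pvWhileA (row : List Int) : Nat → Nat → List Int → List Int
  | 0, _, n => n
  | fuel+1, i, n =>
      pvWhileA row fuel (i+1) (n ++ [score4 (PySem.List.slice row (some (i:Int)) (some ((i:Int)+4)))])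

def score_ligne (g : List (List Int)) : List Int :=
  (PySem.List.pyRange 0 (g.length : Int)).foldl
    (fun n l => pvWhileA (PySem.List.pyGetD g l []) (g.length - 4) 0 n) []

-- ===== PORT B =====
def pvStep (c : Int × Int × Int) (x : Int) : Int × Int × Int :=
  (c.1 + (if x = 0 then 1 else 0), c.2.1 + (if x = 1 then 1 else 0), c.2.2 + (if x = 2 then 1 else 0))

def pvUnstep (c : Int × Int × Int) (x : Int) : Int × Int × Int :=
  (c.1 - (if x = 0 then 1 else 0), c.2.1 - (if x = 1 then 1 else 0), c.2.2 - (if x = 2 then 1 else 0))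

-- closed-form score from a window's (count 0, count 1, count 2)
def pvScore (c0 c1 c2 : Int) : Int :=
  if c2 = 0 ∧ 0 < c1 ∧ c0 = 4 - c1 then (10:Int) ^ (max 0 (2*c1 - 3)).toNat
  else if c1 = 0 ∧ 0 < c2 ∧ c2 < 4 ∧ c0 = 4 - c2 then
    (if c2 = 3 then -(5 * (10:Int) ^ (c2-1).toNat) else -((10:Int) ^ (c2-1).toNat))
  else 0

-- slide the counters one step: remove row[i], add row[i+4] (when they exist)
def pvAdvance (row : List Int) (i : Nat) (c : Int × Int × Int) : Int × Int × Int :=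
  let c1 := if i < row.length then pvUnstep c (row.getD i 0) else c
  if i + 4 < row.length then pvStep c1 (row.getD (i+4) 0) else c1

def pvSlide (row : List Int) : Nat → Nat → (Int × Int × Int) → List Int → List Int
  | 0, _, _, out => out
  | m+1, i, c, out =>
      pvSlide row m (i+1) (pvAdvance row i c) (out ++ [pvScore c.1 c.2.1 c.2.2])

def score_ligne_alt (g : List (List Int)) : List Int :=
  let k : Int := (g.length : Int) - 4
  g.foldl (fun out row =>
    pvSlide row k.toNat 0 ((PySem.List.slice row (some 0) (some 4)).foldl pvStep (0,0,0)) out) []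

-- ===== PRECONDITION & SPEC =====
def Spec_score_ligne (g : List (List Int)) (out : List Int) : Prop := out = score_ligne_alt g
instance (g : List (List Int)) (out : List Int) : Decidable (Spec_score_ligne g out) := by unfold Spec_score_ligne; infer_instance

-- ===== CLAIM (what is proved, stated in full; the proofs are below) =====
def Claim_equal_score_ligne : Prop := ∀ (g : List (List Int)), Dom_score_ligne g → Spec_score_ligne g (score_ligne g)

-- ===== LEMMAS AND PROOFS =====

-- the counter triple of a window
def pvCtr (w : List Int) : Int × Int × Int :=
  ((List.count 0 w : Int), (List.count 1 w : Int), (List.count 2 w : Int))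

theorem pv_foldl_pvStep (w : List Int) : ∀ c : Int × Int × Int,
    w.foldl pvStep c = (c.1 + List.count 0 w, c.2.1 + List.count 1 w, c.2.2 + List.count 2 w) := by
  induction w with
  | nil => intro c; simp
  | cons x t ih =>
      intro c
      simp only [List.foldl_cons, ih, pvStep, List.count_cons]
      refine Prod.ext ?_ (Prod.ext ?_ ?_) <;> simp <;> split_ifs <;> omega

theorem pv_three_counts_le (w : List Int) :
    List.count 0 w + List.count 1 w + List.count 2 w ≤ w.length := by
  induction w with
  | nil => simp
  | cons x t ih =>
      simp only [List.count_cons, List.length_cons, beq_iff_eq]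
      split_ifs <;> omega

theorem pv_chain_eq (a b c : Nat) (h : a + b + c ≤ 4) :
    (if a = 4 then (0:Int) + 0
     else if 0 < b ∧ 0 < c then 0 + 0
     else if b = 1 ∧ a = 3 then 0 + 1
     else if b = 2 ∧ a = 2 then 0 + 10
     else if b = 3 ∧ a = 1 then 0 + 1000
     else if b = 4 then 0 + 100000
     else if c = 1 ∧ a = 3 then 0 - 1
     else if c = 2 ∧ a = 2 then 0 - 10
     else if c = 3 ∧ a = 1 then 0 - 500
     else 0) = pvScore (a : Int) (b : Int) (c : Int) := by
  have ha : a ≤ 4 := by omega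
  have hb : b ≤ 4 := by omega
  have hc : c ≤ 4 := by omega
  interval_cases a <;> interval_cases b <;> interval_cases c <;> first | decide | omega

theorem pv_score4_eq (w : List Int) (hw : w.length ≤ 4) :
    score4 w = pvScore (pvCtr w).1 (pvCtr w).2.1 (pvCtr w).2.2 := by
  have h := pv_three_counts_le w
  simp only [score4, pvCtr, PySem.List.count_eq]
  exact pv_chain_eq _ _ _ (by omega)

theorem pvCtr_cons (x : Int) (t : List Int) : pvCtr (x :: t) = pvStep (pvCtr t) x := by
  simp [pvCtr, pvStep, List.count_cons]

theorem pvCtr_append_singleton (t : List Int) (x : Int) :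
    pvCtr (t ++ [x]) = pvStep (pvCtr t) x := by
  simp [pvCtr, pvStep, List.count_append, List.count_cons]

theorem pvUnstep_pvStep (c : Int × Int × Int) (x : Int) : pvUnstep (pvStep c x) x = c := by
  obtain ⟨a, b, d⟩ := c
  simp [pvStep, pvUnstep]

theorem pv_ctr_advance (row : List Int) (i : Nat) :
    pvAdvance row i (pvCtr ((row.drop i).take 4)) = pvCtr ((row.drop (i+1)).take 4) := by
  by_cases h : i < row.length
  · have e4 : (row.drop i).take 4 = row[i] :: (row.drop (i+1)).take 3 := by
      rw [List.drop_eq_getElem_cons h, show (4:Nat) = 3+1 from rfl, List.take_succ_cons]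
    have e2 : (row.drop (i+1)).take 4 = (row.drop (i+1)).take 3 ++ (row.drop (i+1))[3]?.toList :=
      List.take_add_one
    have e3 : (row.drop (i+1))[3]? = row[i+4]? := by rw [List.getElem?_drop]
    have hg : row.getD i 0 = row[i] := by
      simp [List.getD, List.getElem?_eq_getElem h]
    rw [e2, e3, e4, pvCtr_cons]
    simp only [pvAdvance, if_pos h, hg, pvUnstep_pvStep]
    by_cases h4 : i + 4 < row.length
    · rw [if_pos h4, List.getElem?_eq_getElem h4, Option.toList_some, pvCtr_append_singleton]
      congr 1
      simp [List.getD, List.getElem?_eq_getElem h4]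
    · rw [if_neg h4, List.getElem?_eq_none (by omega), Option.toList_none, List.append_nil]
  · have e1 : row.drop i = [] := List.drop_eq_nil_of_le (by omega)
    have e2 : row.drop (i+1) = [] := List.drop_eq_nil_of_le (by omega)
    simp [pvAdvance, e1, e2, if_neg h, if_neg (show ¬ i + 4 < row.length by omega)]

theorem pv_slide_eq (row : List Int) : ∀ (m i : Nat) (out : List Int),
    pvSlide row m i (pvCtr ((row.drop i).take 4)) out = pvWhileA row m i out := by
  intro m
  induction m with
  | zero => intro i out; rfl
  | succ m ih =>
      intro i out
      have hs : PySem.List.slice row (some (i:Int)) (some ((i:Int)+4)) = (row.drop i).take 4 := by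
        rw [show ((i:Int) + 4) = ((i:Int) + ((4:Nat):Int)) by norm_num,
          PySem.List.slice_natCast_add]
      simp only [pvSlide, pvWhileA, hs, pv_ctr_advance row i, ih,
        pv_score4_eq _ (le_trans (List.length_take_le _ _) (le_refl 4))]

-- ===== VERDICT (by name: the statement is the Claim_ definition above) =====
theorem score_ligne_spec : Claim_equal_score_ligne := by
  intro g _
  show score_ligne g = score_ligne_alt g
  simp only [score_ligne, score_ligne_alt]
  rw [PySem.List.foldl_pyRange_zero_pyGetD' g []
    (fun acc row => pvWhileA row (g.length - 4) 0 acc) []]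
  apply PySem.List.foldl_congr_mem
  intro out row _
  have hinit : (PySem.List.slice row (some 0) (some 4)).foldl pvStep (0,0,0)
      = pvCtr ((row.drop 0).take 4) := by
    rw [PySem.List.slice_zero_start, PySem.List.slice_to row (by norm_num)]
    simp [pv_foldl_pvStep, pvCtr]
  have hk : (((g.length : Int) - 4)).toNat = g.length - 4 := by omega
  rw [hinit, hk]
  exact (pv_slide_eq row (g.length - 4) 0 out).symm
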